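-- pv_equiv track=rewrite | github.com/edoardob90/aoc | 2023/11/11.py | dist_sum
-- ===== SOURCE A (Python) =====
-- def dist_sum(positions: list[int], expansion: int = 2) -> int:
--     total = 0
--     open_dist = 0
--     current = positions[0]
--     count = 1
--
--     for n in positions[1:]:
--         if n > current:
--             dist_to_prev = (n - current - 1) * expansion + 1
--             open_dist += count * dist_to_prev
--         total += open_dist
--         count += 1
--         current = n
--
--     return total
-- ===== SOURCE B (Python) =====
-- def dist_sum(positions: list[int], expansion: int = 2) -> int:
--     if not positions:
--         return 0
--     # cumulative expanded coordinates: e[0] = 0, then add the expanded gap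
--     # (clamped to 0 for non-increasing steps)
--     e = [0]
--     for prev, cur in zip(positions, positions[1:]):
--         step = (cur - prev - 1) * expansion + 1 if cur > prev else 0
--         e.append(e[-1] + step)
--     n = len(positions)
--     # sum of all pairwise differences e[j] - e[i] (i < j) as a rank-weighted sum
--     return sum(c * (2 * i - (n - 1)) for i, c in enumerate(e))
-- ===== Notes on version B (the rewrite author's own statement) =====
-- stated objective: alternative
-- what changed: Replaces A's stateful running-open-distance accumulation across iterations with an explicit cumulative expanded-coordinate table followed by a rank-weighted sum sum(e[i]*(2*i-(N-1))).
import Mathlib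
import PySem

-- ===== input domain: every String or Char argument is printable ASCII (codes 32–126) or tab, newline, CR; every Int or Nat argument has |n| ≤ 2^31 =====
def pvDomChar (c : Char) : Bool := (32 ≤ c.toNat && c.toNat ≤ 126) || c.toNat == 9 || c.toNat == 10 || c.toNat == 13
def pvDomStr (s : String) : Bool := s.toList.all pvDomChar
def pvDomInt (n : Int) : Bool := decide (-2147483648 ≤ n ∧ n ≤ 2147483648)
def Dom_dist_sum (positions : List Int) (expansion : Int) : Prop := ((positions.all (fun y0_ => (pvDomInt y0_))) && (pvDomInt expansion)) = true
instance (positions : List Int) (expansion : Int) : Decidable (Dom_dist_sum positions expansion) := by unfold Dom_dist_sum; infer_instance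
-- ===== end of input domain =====

-- B computes the same sum via a cumulative expanded-coordinate table and a
-- rank-weighted sum, instead of A's running open-distance accumulator.

-- ===== PORT A =====
-- state: (total, open_dist, current, count); loop over positions[1:]
def dist_sum (positions : List Int) (expansion : Int) : Int :=
  match positions with
  | [] => 0  -- unreachable under Pre_dist_sum (Python raises IndexError here)
  | c :: rest =>
    (rest.foldl
      (fun (s : Int × Int × Int × Int) n =>
        let total := s.1; let od := s.2.1; let cur := s.2.2.1; let cnt := s.2.2.2
        let od' := if n > cur then od + cnt * ((n - cur - 1) * expansion + 1) else od
        (total + od', od', n, cnt + 1))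
      (0, 0, c, 1)).1

-- ===== PORT B =====
-- e[-1]-appending loop over zip(positions, positions[1:]): carried as (prev, acc)
def buildE (expansion : Int) : Int → Int → List Int → List Int
  | _, acc, [] => [acc]
  | prev, acc, cur :: rest =>
    acc :: buildE expansion cur
      (acc + (if cur > prev then (cur - prev - 1) * expansion + 1 else 0)) rest

-- sum(c * (2*i - (n-1)) for i, c in enumerate(e))
def weightedSum (n : Int) : Int → List Int → Int
  | _, [] => 0
  | i, c :: cs => c * (2 * i - (n - 1)) + weightedSum n (i + 1) cs

def dist_sum_alt (positions : List Int) (expansion : Int) : Int :=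
  match positions with
  | [] => 0
  | p0 :: rest =>
    let e := buildE expansion p0 0 rest
    weightedSum ((rest.length : Int) + 1) 0 e

-- ===== PRECONDITION & SPEC =====
-- Pre_ excludes only the empty list, on which the Python A raises IndexError.
def Pre_dist_sum (positions : List Int) (expansion : Int) : Prop := positions ≠ []
instance (positions : List Int) (expansion : Int) : Decidable (Pre_dist_sum positions expansion) := by unfold Pre_dist_sum; infer_instance
def pvWitness_dist_sum : List Int × Int := ([1, 4, 5], 2)

def Spec_dist_sum (positions : List Int) (expansion : Int) (out : Int) : Prop := out = dist_sum_alt positions expansion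
instance (positions : List Int) (expansion : Int) (out : Int) : Decidable (Spec_dist_sum positions expansion out) := by unfold Spec_dist_sum; infer_instance

-- ===== CLAIM (what is proved, stated in full; the proofs are below) =====
def Claim_equal_dist_sum : Prop := ∀ (positions : List Int) (expansion : Int), Dom_dist_sum positions expansion → Pre_dist_sum positions expansion → Spec_dist_sum positions expansion (dist_sum positions expansion)

-- ===== LEMMAS AND PROOFS =====

-- the "fresh contribution" of the remaining steps, common to both analyses
def fresh (expansion : Int) : List Int → Int → Int → Int
  | [], _, _ => 0
  | n :: r, cur, cnt =>
    (if n > cur then (n - cur - 1) * expansion + 1 else 0) * cnt * ((r.length : Int) + 1)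
      + fresh expansion r n (cnt + 1)

theorem foldA_eq (expansion : Int) (rest : List Int) :
    ∀ total od cur cnt,
      (rest.foldl
        (fun (s : Int × Int × Int × Int) n =>
          let total := s.1; let od := s.2.1; let cur := s.2.2.1; let cnt := s.2.2.2
          let od' := if n > cur then od + cnt * ((n - cur - 1) * expansion + 1) else od
          (total + od', od', n, cnt + 1))
        (total, od, cur, cnt)).1
      = total + od * rest.length + fresh expansion rest cur cnt := by
  induction rest with
  | nil => intro total od cur cnt; simp [fresh]
  | cons n r ih =>
    intro total od cur cnt
    simp only [List.foldl_cons, fresh, List.length_cons]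
    rw [ih]
    split_ifs <;> push_cast <;> ring

theorem weightedSum_buildE (expansion : Int) (rest : List Int) :
    ∀ prev acc (i n : Int), n = i + rest.length + 1 →
      weightedSum n i (buildE expansion prev acc rest)
        = acc * ((rest.length : Int) + 1) * i + fresh expansion rest prev (i + 1) := by
  induction rest with
  | nil =>
    intro prev acc i n hn
    simp only [buildE, weightedSum, fresh, List.length_nil] at *
    rw [hn]; push_cast; ring
  | cons cur r ih =>
    intro prev acc i n hn
    simp only [buildE, weightedSum, fresh, List.length_cons] at *
    rw [ih cur _ (i + 1) n (by push_cast at hn ⊢; omega)]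
    subst hn
    split_ifs <;> push_cast <;> ring

-- ===== VERDICT (by name: the statement is the Claim_ definition above) =====
theorem dist_sum_spec : Claim_equal_dist_sum := by
  intro positions expansion _ hpre
  match positions with
  | [] => exact absurd rfl hpre
  | p0 :: rest =>
    show dist_sum (p0 :: rest) expansion = dist_sum_alt (p0 :: rest) expansion
    simp only [dist_sum, dist_sum_alt]
    rw [foldA_eq, weightedSum_buildE expansion rest p0 0 0 ((rest.length : Int) + 1) (by ring)]
    ring
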